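-- pv_equiv track=rewrite | github.com/Dimanar/Sierentz-Global-Merchants | lucky.py | luckySeq2
-- ===== SOURCE A (Python) =====
-- def luckySeq2(sequence: str, lucky=("5", "6")) -> str:
--
--     N = len(sequence)
--     if N <= 1:
--         return '0'
--
--     i, j = 0, 0
--     lucky_nums = []
--     while i < N - 1:
--         if sequence[i] not in lucky:
--             i += 1
--             j += 1
--         else:
--             while j < N:
--                 if sequence[j] not in lucky or j == N - 1:
--                     if j == N - 1:
--                         temp = sequence[i: j + 1]
--                     else:
--                         temp = sequence[i: j]
--                     if len(set(temp)) == 2: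
--                         lucky_nums.append(temp)
--                     i = j
--                     break
--                 else:
--                     j += 1
--
--     # this return does not mean it will return the longest string, in such cases not working properly
--     # return max(lucky_nums) if lucky_nums else '0'
--     return sorted(lucky_nums, key=len, reverse=True)[0] if lucky_nums else "0"
-- ===== SOURCE B (Python) =====
-- def luckySeq2(sequence: str, lucky=("5", "6")) -> str:
--     lucky_set = set(lucky)
--     best = []
--     run = []
--     for ch in sequence:
--         if ch in lucky_set:
--             run.append(ch)
--         else:
--             if len(set(run)) == 2 and len(run) > len(best):
--                 best = run
--             run = []
--     if len(set(run)) == 2 and len(run) > len(best):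
--         best = run
--     return ''.join(best) if best else "0"
-- ===== Notes on version B (the rewrite author's own statement) =====
-- stated objective: faster
-- what changed: B replaces A's index-juggling nested while loops that collect candidate substrings and then sort them by length with a single forward pass over a hash set built once from lucky, keeping the first longest valid run and returning it directly without building or sorting a candidate list.
-- intended difference: On strings whose last character is not lucky but follows a run of at most two distinct lucky characters that no earlier two-distinct run can beat, A slices that trailing character into the final candidate (returning e.g. '55a' on '55a' and '0' on '56a'), while B returns the longest two-distinct lucky run ('0' resp. '56'), the intended value. — e.g. on luckySeq2("56a", ["5", "6"]): A returns "0", B returns "56"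
import Mathlib
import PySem

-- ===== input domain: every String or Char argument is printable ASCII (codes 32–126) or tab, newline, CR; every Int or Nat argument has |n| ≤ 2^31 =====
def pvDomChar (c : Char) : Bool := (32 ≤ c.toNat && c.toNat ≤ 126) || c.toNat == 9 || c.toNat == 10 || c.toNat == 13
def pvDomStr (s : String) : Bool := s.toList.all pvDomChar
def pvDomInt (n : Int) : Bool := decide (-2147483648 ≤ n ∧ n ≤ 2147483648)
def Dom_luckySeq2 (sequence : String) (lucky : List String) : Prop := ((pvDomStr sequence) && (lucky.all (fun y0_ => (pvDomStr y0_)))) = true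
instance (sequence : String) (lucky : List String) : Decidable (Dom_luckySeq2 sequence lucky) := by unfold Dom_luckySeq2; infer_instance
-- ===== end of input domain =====

-- B is a single scan keeping the first longest run of lucky characters containing exactly
-- two distinct ones; it drops A's candidate list + sort, and differs from A only on the
-- inputs described at D_luckySeq2 below (return values only; neither version mutates anything).

-- ===== PORT A =====
-- `x in lucky` on a one-character string x (shared by both Pythons)
def pvIsLucky (lucky : List String) (c : Char) : Bool := lucky.contains (String.singleton c)

-- the inner `while j < N:` loop; returns (j at break, lucky_nums); Python state i is read-only here
def pvInner (lucky : List String) (cs : List Char) (fuel : Nat) (i j : Nat)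
    (acc : List (List Char)) : Nat × List (List Char) :=
  match fuel with
  | 0 => (j, acc)  -- fuel only makes the loop total; j < N increments < N times per entry
  | fuel + 1 =>
    if h : j < cs.length then
      if !(pvIsLucky lucky (cs[j]'h)) || j == cs.length - 1 then
        let temp := if j == cs.length - 1
          then PySem.List.slice cs (some (i : Int)) (some ((j : Int) + 1))
          else PySem.List.slice cs (some (i : Int)) (some (j : Int))
        (j, if (PySem.Set.ofList temp).length == 2 then acc ++ [temp] else acc)
      else pvInner lucky cs fuel i (j + 1) acc
    else (j, acc)  -- unreachable from the outer loop (the break always fires by j = N-1)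

-- the outer `while i < N - 1:` loop; fuel only makes the recursion total (Python's i
-- strictly increases each iteration, so fuel = N + 1 is never exhausted on real runs)
def pvOuter (lucky : List String) (cs : List Char) (fuel i j : Nat) (acc : List (List Char)) :
    List (List Char) :=
  match fuel with
  | 0 => acc
  | fuel + 1 =>
    if hi : i < cs.length - 1 then
      if !(pvIsLucky lucky (cs[i]'(by omega))) then pvOuter lucky cs fuel (i + 1) (j + 1) acc
      else
        let r := pvInner lucky cs (cs.length + 1) i j acc
        pvOuter lucky cs fuel r.1 r.1 r.2
    else acc

def luckySeq2 (sequence : String) (lucky : List String) : String :=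
  let cs := sequence.toList
  let N := cs.length
  if N ≤ 1 then "0"
  else
    let lucky_nums := pvOuter lucky cs (N + 1) 0 0 []
    if lucky_nums = [] then "0"
    else String.ofList (PySem.List.pyGetD (PySem.List.sorted lucky_nums (fun t => t.length) true) 0 [])

-- ===== PORT B =====
-- the `for ch in sequence:` loop of Source B, carrying (best, run)
def pvAltLoop (luckySet : PySem.Set String) (best run : List Char) : List Char → List Char × List Char
  | [] => (best, run)
  | ch :: rest =>
    if luckySet.contains (String.singleton ch) then
      pvAltLoop luckySet best (run ++ [ch]) rest
    else
      let best := if (PySem.Set.ofList run).length == 2 && decide (best.length < run.length)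
        then run else best
      pvAltLoop luckySet best [] rest

def luckySeq2_alt (sequence : String) (lucky : List String) : String :=
  let luckySet := PySem.Set.ofList lucky
  let st := pvAltLoop luckySet [] [] sequence.toList
  let best := st.1
  let run := st.2
  let best := if (PySem.Set.ofList run).length == 2 && decide (best.length < run.length)
    then run else best
  if best = [] then "0" else String.ofList best

-- ===== PRECONDITION & SPEC =====
-- On strings whose last character is not lucky but follows a run of at most two distinct
-- lucky characters no earlier two-distinct run can beat, A slices that trailing character
-- into its final candidate (returning e.g. '55a' on '55a' and '0' on '56a'), while B
-- returns the longest two-distinct lucky run ('0' resp. '56'), the intended value.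
def D_luckySeq2 (sequence : String) (lucky : List String) : Prop :=
  let p := pvIsLucky lucky
  let bs := (sequence.toList.dropLast.splitBy (p · == p ·)).filter (·.all p)
  let r := bs.getLastD []
  p (sequence.toList.getLastD ' ') = false ∧ p (sequence.toList.dropLast.getLastD ' ') = true ∧
    r ≠ [] ∧ r.dedup.length ≤ 2 ∧
    ∀ b ∈ bs.dropLast, b.dedup.length = 2 → b.length + r.dedup.length < r.length + 2
instance (sequence : String) (lucky : List String) : Decidable (D_luckySeq2 sequence lucky) := by
  unfold D_luckySeq2; infer_instance

def Spec_luckySeq2 (sequence : String) (lucky : List String) (out : String) : Prop :=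
  ¬ D_luckySeq2 sequence lucky → out = luckySeq2_alt sequence lucky
instance (sequence : String) (lucky : List String) (out : String) :
    Decidable (Spec_luckySeq2 sequence lucky out) := by unfold Spec_luckySeq2; infer_instance

def pvDiffWitness_luckySeq2 : String × List String := ("56a", ["5", "6"])
def pvDiffWitnessOut_luckySeq2 : String × String := ("0", "56")

-- ===== CLAIM (what is proved, stated in full; the proofs are below) =====
def Claim_unchanged_luckySeq2 : Prop := ∀ (sequence : String) (lucky : List String), Dom_luckySeq2 sequence lucky → Spec_luckySeq2 sequence lucky (luckySeq2 sequence lucky)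
def Claim_changed_luckySeq2 : Prop := Dom_luckySeq2 (pvDiffWitness_luckySeq2.1) (pvDiffWitness_luckySeq2.2) ∧ D_luckySeq2 (pvDiffWitness_luckySeq2.1) (pvDiffWitness_luckySeq2.2) ∧ luckySeq2 (pvDiffWitness_luckySeq2.1) (pvDiffWitness_luckySeq2.2) = pvDiffWitnessOut_luckySeq2.1 ∧ luckySeq2_alt (pvDiffWitness_luckySeq2.1) (pvDiffWitness_luckySeq2.2) = pvDiffWitnessOut_luckySeq2.2 ∧ pvDiffWitnessOut_luckySeq2.1 ≠ pvDiffWitnessOut_luckySeq2.2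
def Claim_exact_luckySeq2 : Prop := ∀ (sequence : String) (lucky : List String), Dom_luckySeq2 sequence lucky → D_luckySeq2 sequence lucky → luckySeq2 sequence lucky ≠ luckySeq2_alt sequence lucky

-- ===== LEMMAS AND PROOFS =====

def pvAllLucky (lucky : List String) (l : List Char) : Bool := l.all (pvIsLucky lucky)

-- the maximal all-lucky suffix of a list, and what precedes it
def pvSufRun (lucky : List String) : List Char → List Char
  | [] => []
  | c :: t => if pvIsLucky lucky c && pvAllLucky lucky t then c :: t else pvSufRun lucky t

def pvCore (lucky : List String) : List Char → List Char
  | [] => []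
  | c :: t => if pvIsLucky lucky c && pvAllLucky lucky t then [] else c :: pvCore lucky t

-- maximal runs of lucky characters (p = the run being grown)
def pvRunsPre (lucky : List String) (p : List Char) : List Char → List (List Char)
  | [] => if p = [] then [] else [p]
  | c :: t =>
    if pvIsLucky lucky c then pvRunsPre lucky (p ++ [c]) t
    else (if p = [] then [] else [p]) ++ pvRunsPre lucky [] t

def pvRuns (lucky : List String) (cs : List Char) : List (List Char) := pvRunsPre lucky [] cs

def pvDist2 (l : List Char) : Bool := (PySem.Set.ofList l).length == 2

def pvCands (lucky : List String) (cs : List Char) : List (List Char) :=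
  (pvRuns lucky cs).filter pvDist2

def pvMaxLen (L : List (List Char)) : Nat := L.foldl (fun m r => max m r.length) 0


-- candidate filter on a single run
def pvFilt (l : List Char) : List (List Char) := if pvDist2 l then [l] else []

-- A's candidate list, characterised structurally (run by run, with A's treatment of the end)
mutual
def pvF (lucky : List String) (cs : List Char) : List (List Char) :=
  match cs with
  | [] => []
  | [_] => []
  | c :: c2 :: t =>
    if pvIsLucky lucky c then
      pvFend lucky ((c :: c2 :: t).takeWhile (pvIsLucky lucky))
        ((c :: c2 :: t).dropWhile (pvIsLucky lucky))
    else pvF lucky (c2 :: t)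
termination_by (cs.length, 0)
decreasing_by
  all_goals refine Prod.Lex.left _ _ ?_
  all_goals try simp
  all_goals have := List.length_dropWhile_le (p := pvIsLucky lucky) (l := c2 :: t)
  all_goals simp_all [List.dropWhile]
  all_goals omega

def pvFend (lucky : List String) (u w : List Char) : List (List Char) :=
  match w with
  | [] => pvFilt u
  | [z] => pvFilt (u ++ [z])
  | z :: v => pvFilt u ++ pvF lucky (z :: v)
termination_by (w.length, 1)
decreasing_by exact Prod.Lex.right _ (by omega)
end

-- first longest element (what both programs return from their candidate lists)
def pvPick (L : List (List Char)) : List Char :=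
  L.foldl (fun b c => if b.length < c.length then c else b) []

def pvOk (lucky : List String) (cs : List Char) : Bool :=
  !cs.isEmpty && !(pvIsLucky lucky (cs.getLastD ' ')) && !(pvSufRun lucky cs.dropLast).isEmpty
def pvR (lucky : List String) (cs : List Char) : List Char := pvSufRun lucky cs.dropLast
def pvM (lucky : List String) (cs : List Char) : List (List Char) :=
  pvCands lucky (pvCore lucky cs.dropLast)

-- ---- small set/length facts ----
lemma pvSet_add_len (s : PySem.Set Char) (x : Char) :
    (PySem.Set.add s x).length ≤ s.length + 1 := by
  rw [PySem.Set.add_eq_ite]; split <;> simp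
lemma pvSet_foldl_len (l : List Char) : ∀ s : PySem.Set Char,
    (l.foldl PySem.Set.add s).length ≤ s.length + l.length := by
  induction l with
  | nil => simp
  | cons c t ih =>
    intro s
    have h1 := pvSet_add_len s c
    have h2 := ih (PySem.Set.add s c)
    simp only [List.foldl_cons, List.length_cons]
    omega
lemma pvSetLen_le (l : List Char) : (PySem.Set.ofList l).length ≤ l.length := by
  have := pvSet_foldl_len l PySem.Set.empty
  simpa [PySem.Set.ofList, PySem.Set.empty] using this
lemma pvDist2_len (l : List Char) (h : pvDist2 l = true) : 2 ≤ l.length := by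
  have := pvSetLen_le l
  simp only [pvDist2, beq_iff_eq] at h
  omega
lemma pvSet_snoc_len (l : List Char) (z : Char) (hz : z ∉ l) :
    (PySem.Set.ofList (l ++ [z])).length = (PySem.Set.ofList l).length + 1 := by
  have : PySem.Set.ofList (l ++ [z]) = PySem.Set.add (PySem.Set.ofList l) z := by
    simp [PySem.Set.ofList, List.foldl_append]
  rw [this, PySem.Set.add_of_not_mem (by rw [PySem.Set.mem_ofList]; exact hz)]
  simp

lemma pvNotMem_of_nonlucky (lucky : List String) (l : List Char) (z : Char)
    (hz : pvIsLucky lucky z = false) (hl : pvAllLucky lucky l = true) : z ∉ l := by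
  intro hm
  simp only [pvAllLucky, List.all_eq_true] at hl
  have := hl z hm
  rw [hz] at this; exact Bool.false_ne_true this

-- ---- pick = running first-longest ----
lemma pvPick_step_len (b c : List Char) :
    (if b.length < c.length then c else b).length = max b.length c.length := by
  split <;> omega
lemma pvPick_foldl_len (L : List (List Char)) : ∀ b : List Char,
    (L.foldl (fun b c => if b.length < c.length then c else b) b).length =
      L.foldl (fun m r => max m r.length) b.length := by
  induction L with
  | nil => intro b; rfl
  | cons x t ih =>
    intro b
    simp only [List.foldl_cons]
    rw [ih, pvPick_step_len]
lemma pvPick_len (L : List (List Char)) : (pvPick L).length = pvMaxLen L := by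
  simpa [pvPick, pvMaxLen] using pvPick_foldl_len L []
lemma pvMaxLen_ge (L : List (List Char)) (x : List Char) (hx : x ∈ L) :
    x.length ≤ pvMaxLen L :=
  (PySem.List.le_foldl_max_nat L (fun r => r.length) 0).2 x hx
lemma pvPick_append_singleton (M : List (List Char)) (x : List Char) :
    pvPick (M ++ [x]) = if (pvPick M).length < x.length then x else pvPick M := by
  simp [pvPick, List.foldl_append]

-- ---- head of PySem's stable reverse sort by length = pvPick ----
lemma pvHead_insertBy (before : List Char → List Char → Bool) (x : List Char)
    (l : List (List Char)) :
    (PySem.List.insertBy before x l).head? =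
      some (match l with | [] => x | y :: _ => if before x y then x else y) := by
  cases l with
  | nil => rfl
  | cons y t => simp only [PySem.List.insertBy]; split <;> simp_all
lemma pvHead_foldl_insertBy (before : List Char → List Char → Bool)
    (xs : List (List Char)) : ∀ acc : List (List Char),
    (xs.foldl (fun acc x => PySem.List.insertBy before x acc) acc).head? =
      xs.foldl (fun b? x => match b? with
        | none => some x
        | some b => if before x b then some x else some b) acc.head? := by
  induction xs with
  | nil => intro acc; rfl
  | cons x t ih =>
    intro acc
    simp only [List.foldl_cons]
    rw [ih, pvHead_insertBy]
    cases acc with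
    | nil => rfl
    | cons y ys =>
      show (t.foldl _ (some (if before x y then x else y))) =
        (t.foldl _ (if before x y then some x else some y))
      by_cases h : before x y = true
      · rw [if_pos h, if_pos h]
      · rw [if_neg h, if_neg h]
lemma pvFoldl_optstep (before : List Char → List Char → Bool) (xs : List (List Char)) :
    ∀ b : List Char,
    (xs.foldl (fun b? x => match b? with
        | none => some x
        | some b => if before x b then some x else some b) (some b)) =
      some (xs.foldl (fun b x => if before x b then x else b) b) := by
  induction xs with
  | nil => intro b; rfl
  | cons x t ih =>
    intro b
    simp only [List.foldl_cons]
    show t.foldl _ (if before x b then some x else some b) = _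
    by_cases h : before x b = true
    · rw [if_pos h, if_pos h]; exact ih x
    · rw [if_neg h, if_neg h]; exact ih b
lemma pvSorted_head (x : List Char) (t : List (List Char)) :
    (PySem.List.sorted (x :: t) (fun s => s.length) true).head? =
      some (t.foldl (fun b c => if b.length < c.length then c else b) x) := by
  unfold PySem.List.sorted
  show ((x :: t).foldl (fun acc y =>
      PySem.List.insertBy (fun a b => decide (b.length < a.length)) y acc) []).head? = _
  rw [pvHead_foldl_insertBy]
  simp only [List.foldl_cons, List.head?_nil]
  show (t.foldl _ (some x)) = _
  rw [pvFoldl_optstep]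
  simp only [decide_eq_true_eq]
lemma pvPick_cons_big (x : List Char) (t : List (List Char)) (hx : x ≠ []) :
    pvPick (x :: t) = t.foldl (fun b c => if b.length < c.length then c else b) x := by
  have h0 : 0 < x.length := List.length_pos_iff.mpr hx
  simp [pvPick, h0]

-- ---- runs lemmas ----
lemma pvRunsPre_lucky_append (lucky : List String) (u : List Char)
    (hu : pvAllLucky lucky u = true) : ∀ (p : List Char) (w : List Char),
    pvRunsPre lucky p (u ++ w) = pvRunsPre lucky (p ++ u) w := by
  induction u with
  | nil => intro p w; simp
  | cons c t ih =>
    intro p w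
    simp only [pvAllLucky, List.all_cons, Bool.and_eq_true] at hu
    simp only [List.cons_append, pvRunsPre, hu.1, if_pos]
    rw [ih (by simpa [pvAllLucky] using hu.2) (p ++ [c]) w]
    simp
lemma pvRuns_cons_nonlucky (lucky : List String) (z : Char) (v : List Char)
    (hz : pvIsLucky lucky z = false) : pvRuns lucky (z :: v) = pvRuns lucky v := by
  simp [pvRuns, pvRunsPre, hz]
lemma pvRuns_all_lucky (lucky : List String) (cs : List Char)
    (hu : pvAllLucky lucky cs = true) (hne : cs ≠ []) : pvRuns lucky cs = [cs] := by
  have := pvRunsPre_lucky_append lucky cs hu [] []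
  simpa [pvRuns, pvRunsPre, hne] using this
lemma pvRuns_run_append (lucky : List String) (u : List Char) (z : Char) (v : List Char)
    (hu : pvAllLucky lucky u = true) (hune : u ≠ []) (hz : pvIsLucky lucky z = false) :
    pvRuns lucky (u ++ z :: v) = u :: pvRuns lucky v := by
  rw [pvRuns, pvRunsPre_lucky_append lucky u hu [] (z :: v)]
  simp [pvRunsPre, hz, hune, pvRuns]

-- ---- suffix-run / core lemmas ----
lemma pvSufRun_all (lucky : List String) (l : List Char) (h : pvAllLucky lucky l = true) :
    pvSufRun lucky l = l := by
  cases l with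
  | nil => rfl
  | cons c t =>
    simp only [pvAllLucky, List.all_cons, Bool.and_eq_true] at h
    simp [pvSufRun, h.1, show pvAllLucky lucky t = true by simpa [pvAllLucky] using h.2]
lemma pvAllLucky_append_cons_false (lucky : List String) (l : List Char) (z : Char)
    (m : List Char) (hz : pvIsLucky lucky z = false) :
    pvAllLucky lucky (l ++ z :: m) = false := by
  simp [pvAllLucky, List.all_append, List.all_cons, hz]
lemma pvSufRun_append_nonlucky (lucky : List String) (z : Char) (m : List Char)
    (hz : pvIsLucky lucky z = false) : ∀ l : List Char,
    pvSufRun lucky (l ++ z :: m) = pvSufRun lucky m := by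
  intro l
  induction l with
  | nil => simp [pvSufRun, hz]
  | cons a l ih =>
    simp only [List.cons_append, pvSufRun,
      pvAllLucky_append_cons_false lucky l z m hz, Bool.and_false,
      Bool.false_eq_true, if_false]
    exact ih
lemma pvCore_append_nonlucky (lucky : List String) (z : Char) (m : List Char)
    (hz : pvIsLucky lucky z = false) : ∀ l : List Char,
    pvCore lucky (l ++ z :: m) = l ++ z :: pvCore lucky m := by
  intro l
  induction l with
  | nil => simp [pvCore, hz]
  | cons a l ih =>
    simp only [List.cons_append, pvCore,
      pvAllLucky_append_cons_false lucky l z m hz, Bool.and_false,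
      Bool.false_eq_true, if_false]
    rw [ih]
lemma pvCore_all (lucky : List String) (l : List Char) (h : pvAllLucky lucky l = true) :
    pvCore lucky l = [] := by
  cases l with
  | nil => rfl
  | cons c t =>
    simp only [pvAllLucky, List.all_cons, Bool.and_eq_true] at h
    simp [pvCore, h.1, show pvAllLucky lucky t = true by simpa [pvAllLucky] using h.2]

-- ---- B's loop = first-longest over the filtered runs ----
def pvBStep (lucky : List String) (st : List Char × List Char) (ch : Char) :
    List Char × List Char :=
  if pvIsLucky lucky ch then (st.1, st.2 ++ [ch])
  else (if (PySem.Set.ofList st.2).length == 2 && decide (st.1.length < st.2.length)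
          then st.2 else st.1, [])
def pvBFin (st : List Char × List Char) : List Char :=
  if (PySem.Set.ofList st.2).length == 2 && decide (st.1.length < st.2.length)
    then st.2 else st.1

lemma pvBFin_eq_foldl (best run : List Char) :
    pvBFin (best, run) = ((if run = [] then [] else [run]).filter pvDist2).foldl
      (fun b c => if b.length < c.length then c else b) best := by
  by_cases hr : run = []
  · subst hr; simp [pvBFin, pvDist2, PySem.Set.ofList, PySem.Set.empty]
  · simp only [hr, if_neg, if_false]
    by_cases hd : pvDist2 run = true
    · have : List.filter pvDist2 [run] = [run] := by simp [hd]
      rw [this]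
      simp only [List.foldl_cons, List.foldl_nil, pvBFin]
      by_cases hlt : best.length < run.length
      · rw [if_pos (by simp [pvDist2] at hd; simp [hd, hlt]), if_pos hlt]
      · rw [if_neg (by simp [hlt]), if_neg hlt]
    · have : List.filter pvDist2 [run] = [] := by simp [List.filter, hd]
      rw [this]
      simp only [List.foldl_nil, pvBFin]
      rw [if_neg]
      simp only [pvDist2] at hd
      simp [hd]
lemma pvB_fold (lucky : List String) (cs : List Char) : ∀ best run : List Char,
    pvBFin (cs.foldl (pvBStep lucky) (best, run)) =
      ((pvRunsPre lucky run cs).filter pvDist2).foldl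
        (fun b c => if b.length < c.length then c else b) best := by
  induction cs with
  | nil => intro best run; simpa [pvRunsPre] using pvBFin_eq_foldl best run
  | cons c t ih =>
    intro best run
    by_cases hc : pvIsLucky lucky c = true
    · simp only [List.foldl_cons, pvBStep, hc, if_pos, pvRunsPre]
      exact ih best (run ++ [c])
    · simp only [List.foldl_cons, pvBStep, hc, Bool.false_eq_true, if_false, pvRunsPre,
        List.filter_append, List.foldl_append]
      rw [ih _ []]
      rw [← pvBFin_eq_foldl best run]
      rfl
lemma pvContains_ofList (lucky : List String) (c : Char) :
    (PySem.Set.ofList lucky).contains (String.singleton c) = pvIsLucky lucky c := by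
  unfold pvIsLucky
  simp only [List.contains_iff_mem, PySem.Set.contains]
  rw [Bool.eq_iff_iff]
  simp [PySem.Set.mem_ofList]
lemma pvAltLoop_eq_foldl (lucky : List String) : ∀ (cs : List Char) (best run : List Char),
    pvAltLoop (PySem.Set.ofList lucky) best run cs = cs.foldl (pvBStep lucky) (best, run) := by
  intro cs
  induction cs with
  | nil => intro best run; rfl
  | cons ch rest ih =>
    intro best run
    by_cases hc : pvIsLucky lucky ch = true
    · simp only [pvAltLoop, pvContains_ofList, hc, if_true, List.foldl_cons, pvBStep]
      exact ih best (run ++ [ch])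
    · simp only [pvAltLoop, pvContains_ofList, hc, Bool.false_eq_true, if_false,
        List.foldl_cons, pvBStep]
      exact ih _ []
lemma pvAlt_char (sequence : String) (lucky : List String) :
    luckySeq2_alt sequence lucky =
      (if pvPick (pvCands lucky sequence.toList) = [] then "0"
       else String.ofList (pvPick (pvCands lucky sequence.toList))) := by
  show (if pvBFin (pvAltLoop (PySem.Set.ofList lucky) [] [] sequence.toList) = [] then "0"
    else String.ofList (pvBFin (pvAltLoop (PySem.Set.ofList lucky) [] [] sequence.toList))) = _
  rw [pvAltLoop_eq_foldl, pvB_fold lucky sequence.toList [] []]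
  rfl

-- ---- equations for pvF / pvFend ----
lemma pvAccFilt (acc : List (List Char)) (temp : List Char) :
    (if (PySem.Set.ofList temp).length == 2 then acc ++ [temp] else acc) =
      acc ++ pvFilt temp := by
  unfold pvFilt pvDist2
  by_cases h : ((PySem.Set.ofList temp).length == 2) = true
  · rw [if_pos h, if_pos h]
  · rw [if_neg h, if_neg h, List.append_nil]

lemma pvF_nil (lucky : List String) : pvF lucky [] = [] := by
  unfold pvF
  rfl
lemma pvF_singleton (lucky : List String) (x : Char) : pvF lucky [x] = [] := by
  unfold pvF
  rfl
lemma pvF_cons2 (lucky : List String) (c c2 : Char) (t : List Char) :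
    pvF lucky (c :: c2 :: t) =
      if pvIsLucky lucky c then
        pvFend lucky ((c :: c2 :: t).takeWhile (pvIsLucky lucky))
          ((c :: c2 :: t).dropWhile (pvIsLucky lucky))
      else pvF lucky (c2 :: t) := by
  conv_lhs => unfold pvF
lemma pvFend_nil (lucky : List String) (u : List Char) : pvFend lucky u [] = pvFilt u := by
  conv_lhs => unfold pvFend
lemma pvFend_single (lucky : List String) (u : List Char) (z : Char) :
    pvFend lucky u [z] = pvFilt (u ++ [z]) := by conv_lhs => unfold pvFend
lemma pvFend_cons2 (lucky : List String) (u : List Char) (z z2 : Char) (v : List Char) :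
    pvFend lucky u (z :: z2 :: v) = pvFilt u ++ pvF lucky (z :: z2 :: v) := by
  conv_lhs => unfold pvFend
lemma pvF_short (lucky : List String) (cs : List Char) (h : cs.length ≤ 1) :
    pvF lucky cs = [] := by
  match cs, h with
  | [], _ => exact pvF_nil lucky
  | [x], _ => exact pvF_singleton lucky x

-- ---- reading cs[j] inside / at the end of the current run ----
lemma pvGet_drop (cs : List Char) (i j : Nat) (hij : i ≤ j) (hj : j < cs.length) :
    cs[j]'hj = (cs.drop i)[j - i]'(by simp [List.length_drop]; omega) := by
  rw [List.getElem_drop]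
  congr 1
  omega
lemma pvGet_run (lucky : List String) (cs : List Char) (i j : Nat) (hij : i ≤ j)
    (hk : j - i < ((cs.drop i).takeWhile (pvIsLucky lucky)).length) (hj : j < cs.length) :
    pvIsLucky lucky (cs[j]'hj) = true := by
  have hpre : (cs.drop i).takeWhile (pvIsLucky lucky) <+: cs.drop i :=
    List.takeWhile_prefix _
  have h2 : (((cs.drop i).takeWhile (pvIsLucky lucky))[j - i]'hk) ∈
      (cs.drop i).takeWhile (pvIsLucky lucky) := List.getElem_mem _
  have h3 := List.mem_takeWhile_imp h2
  have h4 : (cs.drop i)[j - i]'(by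
      have := hpre.length_le
      simp [List.length_drop] at *
      omega) = ((cs.drop i).takeWhile (pvIsLucky lucky))[j - i]'hk :=
    (hpre.getElem hk).symm
  rw [pvGet_drop cs i j hij hj, h4]
  exact h3
lemma pvGet_end (lucky : List String) (cs : List Char) (i j : Nat) (hij : i ≤ j)
    (heq : j - i = ((cs.drop i).takeWhile (pvIsLucky lucky)).length) (hj : j < cs.length) :
    pvIsLucky lucky (cs[j]'hj) = false := by
  have hsplit : cs.drop i = (cs.drop i).takeWhile (pvIsLucky lucky) ++
      (cs.drop i).dropWhile (pvIsLucky lucky) := (List.takeWhile_append_dropWhile).symm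
  have hlen : ((cs.drop i).takeWhile (pvIsLucky lucky)).length +
      ((cs.drop i).dropWhile (pvIsLucky lucky)).length = cs.length - i := by
    have := congrArg List.length hsplit
    simp only [List.length_drop, List.length_append] at this
    omega
  have hwne : (cs.drop i).dropWhile (pvIsLucky lucky) ≠ [] := by
    intro hcon
    rw [hcon] at hlen
    simp at hlen
    omega
  have hd : j - i < (cs.drop i).length := by simp [List.length_drop]; omega
  have s1 : cs[j]'hj = (cs.drop i)[j - i]'hd := pvGet_drop cs i j hij hj
  have s2 : (cs.drop i)[j - i]'hd =
      ((cs.drop i).dropWhile (pvIsLucky lucky)).head hwne := by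
    rw [List.getElem_of_eq hsplit hd]
    rw [List.getElem_append_right (by omega)]
    have h0 : j - i - ((cs.drop i).takeWhile (pvIsLucky lucky)).length = 0 := by omega
    simp only [h0]
    exact List.getElem_zero_eq_head _
  rw [s1, s2]
  exact List.head_dropWhile_not _ _
-- ---- the inner while loop gathers exactly the current run (with A's end rule) ----
lemma pvInner_spec (lucky : List String) (cs : List Char) (i : Nat) :
    ∀ (fuel j : Nat) (acc : List (List Char)),
    cs.length - j ≤ fuel →
    i ≤ j →
    j ≤ i + ((cs.drop i).takeWhile (pvIsLucky lucky)).length →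
    j ≤ cs.length - 1 →
    1 ≤ cs.length →
    pvInner lucky cs fuel i j acc =
      (min (i + ((cs.drop i).takeWhile (pvIsLucky lucky)).length) (cs.length - 1),
       acc ++ pvFilt (if i + ((cs.drop i).takeWhile (pvIsLucky lucky)).length < cs.length - 1
         then (cs.drop i).takeWhile (pvIsLucky lucky) else cs.drop i)) := by
  intro fuel
  induction fuel with
  | zero =>
    intro j acc hfuel hij hje hjN hN
    omega
  | succ fuel ih =>
    intro j acc hfuel hij hje hjN hN
    have hjlt : j < cs.length := by omega
    set u := (cs.drop i).takeWhile (pvIsLucky lucky) with hu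
    set w := (cs.drop i).dropWhile (pvIsLucky lucky) with hw
    have hsplit : cs.drop i = u ++ w := (List.takeWhile_append_dropWhile).symm
    have hlen : u.length + w.length = cs.length - i := by
      have := congrArg List.length hsplit
      simp only [List.length_drop, List.length_append] at this
      omega
    have hgetj : cs[j] = (cs.drop i)[j - i]'(by simp [List.length_drop]; omega) := by
      rw [List.getElem_drop]
      congr 1
      omega
    by_cases hjlast : j = cs.length - 1
    · -- break with temp = sequence[i : j+1] = cs.drop i
      have hcond : (!(pvIsLucky lucky (cs[j]'hjlt)) || j == cs.length - 1) = true := by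
        simp [hjlast]
      rw [pvInner, dif_pos hjlt, if_pos hcond]
      have hbeq : (j == cs.length - 1) = true := by simpa using hjlast
      have htemp : PySem.List.slice cs (some (i : Int)) (some ((j : Int) + 1)) = cs.drop i := by
        have : ((j : Int) + 1) = ((j + 1 : Nat) : Int) := by push_cast; ring
        rw [this, PySem.List.slice_natCast]
        apply List.take_of_length_le
        simp [List.length_drop]
        omega
      have hmin : min (i + u.length) (cs.length - 1) = j := by
        have : j ≤ i + u.length := hje
        omega
      have hnotlt : ¬ (i + u.length < cs.length - 1) := by omega
      simp only [hbeq, if_true]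
      rw [htemp, pvAccFilt, hmin, if_neg hnotlt]
    · -- j < N - 1
      have hjlt1 : j < cs.length - 1 := by omega
      by_cases hjeq : j < i + u.length
      · -- still inside the run: sequence[j] is lucky, loop again
        have hlucky : pvIsLucky lucky (cs[j]'hjlt) = true :=
          pvGet_run lucky cs i j hij (by rw [← hu]; omega) hjlt
        have hcond : (!(pvIsLucky lucky (cs[j]'hjlt)) || j == cs.length - 1) = false := by
          simp [hlucky, hjlast]
        rw [pvInner, dif_pos hjlt, if_neg (by simp [hcond])]
        exact ih (j + 1) acc (by omega) (by omega) (by omega) (by omega) hN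
      · -- j = i + u.length : sequence[j] is not lucky, break with temp = u
        have hje' : j = i + u.length := by omega
        have hnl : pvIsLucky lucky (cs[j]'hjlt) = false :=
          pvGet_end lucky cs i j hij (by rw [← hu]; omega) hjlt
        have hcond : (!(pvIsLucky lucky (cs[j]'hjlt)) || j == cs.length - 1) = true := by
          simp [hnl]
        rw [pvInner, dif_pos hjlt, if_pos hcond]
        have hbeq : (j == cs.length - 1) = false := by simp [hjlast]
        have htemp : PySem.List.slice cs (some (i : Int)) (some (j : Int)) = u := by
          rw [PySem.List.slice_natCast, hsplit, hje']
          simp only [show i + u.length - i = u.length by omega]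
          apply List.take_left
        have hmin : min (i + u.length) (cs.length - 1) = j := by omega
        have hlt : i + u.length < cs.length - 1 := by omega
        simp only [hbeq, Bool.false_eq_true, if_false]
        rw [htemp, pvAccFilt, hmin, if_pos hlt]

lemma pvF_eq_fend (lucky : List String) (l : List Char) (h2 : 2 ≤ l.length)
    (hl : pvIsLucky lucky l.headI = true) :
    pvF lucky l =
      pvFend lucky (l.takeWhile (pvIsLucky lucky)) (l.dropWhile (pvIsLucky lucky)) := by
  match l, h2 with
  | a :: b :: t, _ => rw [pvF_cons2, if_pos (by simpa using hl)]

-- ---- the outer while loop builds pvF ----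
lemma pvOuter_spec (lucky : List String) (cs : List Char) :
    ∀ (fuel k : Nat) (acc : List (List Char)),
    cs.length - k < fuel →
    pvOuter lucky cs fuel k k acc = acc ++ pvF lucky (cs.drop k) := by
  intro fuel
  induction fuel with
  | zero => intro k acc h; omega
  | succ fuel ih =>
    intro k acc hfuel
    by_cases hk : k < cs.length - 1
    case neg =>
      rw [pvOuter, dif_neg hk,
        pvF_short lucky _ (by simp only [List.length_drop]; omega), List.append_nil]
    case pos =>
      have hkN : k < cs.length := by omega
      have hk1N : k + 1 < cs.length := by omega
      have hdropk : cs.drop k = cs[k] :: cs.drop (k + 1) := List.drop_eq_getElem_cons hkN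
      by_cases hc : pvIsLucky lucky (cs[k]'hkN) = true
      case neg =>
        rw [pvOuter, dif_pos hk, if_pos (by simp [hc])]
        rw [ih (k + 1) acc (by omega)]
        have hdropk1 : cs.drop (k + 1) = cs[k + 1] :: cs.drop (k + 2) :=
          List.drop_eq_getElem_cons hk1N
        rw [hdropk, hdropk1, pvF_cons2, if_neg (by simp [hc]), ← hdropk1]
      case pos =>
        rw [pvOuter, dif_pos hk, if_neg (by simp [hc])]
        set u := ((cs.drop k).takeWhile (pvIsLucky lucky)) with hu
        set w := ((cs.drop k).dropWhile (pvIsLucky lucky)) with hw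
        have hsplit : cs.drop k = u ++ w := (List.takeWhile_append_dropWhile).symm
        have hune : u ≠ [] := by
          rw [hu, hdropk, List.takeWhile_cons_of_pos hc]
          simp
        have hulen : 1 ≤ u.length := List.length_pos_iff.mpr hune
        have hlen : u.length + w.length = cs.length - k := by
          have := congrArg List.length hsplit
          simp only [List.length_drop, List.length_append] at this
          omega
        have hinner := pvInner_spec lucky cs k (cs.length + 1) k acc (by omega)
          (le_refl k) (by omega) (by omega) (by omega)
        rw [← hu] at hinner
        simp only [hinner]
        have hfend : pvF lucky (cs.drop k) = pvFend lucky u w := by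
          rw [pvF_eq_fend lucky _ (by simp only [List.length_drop]; omega)
            (by rw [hdropk]; exact hc)]
        match w, hsplit, hlen with
        | [], hsplit, hlen =>
          have he : k + u.length = cs.length := by
            simp only [List.length_nil] at hlen
            omega
          rw [if_neg (by omega), show min (k + u.length) (cs.length - 1) = cs.length - 1 by omega]
          rw [ih (cs.length - 1) _ (by omega)]
          rw [pvF_short lucky _ (by simp only [List.length_drop]; omega), List.append_nil]
          rw [hfend, pvFend_nil, hsplit, List.append_nil]
        | [z], hsplit, hlen =>
          have he : k + u.length = cs.length - 1 := by
            simp only [List.length_cons, List.length_nil] at hlen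
            omega
          rw [if_neg (by omega), show min (k + u.length) (cs.length - 1) = cs.length - 1 by omega]
          rw [ih (cs.length - 1) _ (by omega)]
          rw [pvF_short lucky _ (by simp only [List.length_drop]; omega), List.append_nil]
          rw [hfend, pvFend_single, hsplit]
        | z :: z2 :: v, hsplit, hlen =>
          have he : k + u.length < cs.length - 1 := by
            simp only [List.length_cons] at hlen
            omega
          rw [if_pos he, show min (k + u.length) (cs.length - 1) = k + u.length by omega]
          rw [ih (k + u.length) _ (by omega)]
          have hdrope : cs.drop (k + u.length) = z :: z2 :: v := by
            have h1 : cs.drop (k + u.length) = (cs.drop k).drop u.length := by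
              rw [List.drop_drop]
            rw [h1, hsplit, List.drop_left]
          rw [hdrope, hfend, pvFend_cons2, List.append_assoc]

lemma pvFilt_mem (x l : List Char) (h : x ∈ pvFilt l) : pvDist2 x = true := by
  unfold pvFilt at h
  split at h
  · rw [List.mem_singleton] at h
    subst h
    assumption
  · simp at h

theorem pvF_mem (lucky : List String) (cs : List Char) :
    ∀ x ∈ pvF lucky cs, pvDist2 x = true := by
  match cs with
  | [] => rw [pvF_nil]; intro x hx; simp at hx
  | [c] => rw [pvF_singleton]; intro x hx; simp at hx
  | c :: c2 :: t =>
    rw [pvF_cons2]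
    by_cases hc : pvIsLucky lucky c = true
    · rw [if_pos hc]
      cases hw : (c :: c2 :: t).dropWhile (pvIsLucky lucky) with
      | nil => rw [pvFend_nil]; intro x hx; exact pvFilt_mem x _ hx
      | cons z v =>
        cases v with
        | nil => rw [pvFend_single]; intro x hx; exact pvFilt_mem x _ hx
        | cons z2 v' =>
          rw [pvFend_cons2]
          intro x hx
          rcases List.mem_append.mp hx with h | h
          · exact pvFilt_mem x _ h
          · exact pvF_mem lucky (z :: z2 :: v') x h
    · rw [if_neg hc]
      exact pvF_mem lucky (c2 :: t)
termination_by cs.length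
decreasing_by
  · rw [List.dropWhile_cons_of_pos hc] at hw
    have := List.length_dropWhile_le (p := pvIsLucky lucky) (l := c2 :: t)
    rw [hw] at this
    simp at this ⊢
    omega
  · simp

lemma pvCands_mem (lucky : List String) (cs : List Char) :
    ∀ x ∈ pvCands lucky cs, pvDist2 x = true := by
  intro x hx
  exact List.of_mem_filter hx

lemma pvA_char (sequence : String) (lucky : List String) :
    luckySeq2 sequence lucky =
      (if pvF lucky sequence.toList = [] then "0"
       else String.ofList (pvPick (pvF lucky sequence.toList))) := by
  by_cases hN : sequence.toList.length ≤ 1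
  · rw [pvF_short lucky _ hN]
    show (if sequence.toList.length ≤ 1 then "0" else _) = _
    rw [if_pos hN, if_pos rfl]
  · show (if sequence.toList.length ≤ 1 then "0" else
      (if pvOuter lucky sequence.toList (sequence.toList.length + 1) 0 0 [] = [] then "0"
       else String.ofList (PySem.List.pyGetD
         (PySem.List.sorted (pvOuter lucky sequence.toList (sequence.toList.length + 1) 0 0 [])
           (fun t => t.length) true) 0 []))) = _
    have houter : pvOuter lucky sequence.toList (sequence.toList.length + 1) 0 0 [] =
        pvF lucky sequence.toList := by
      have h := pvOuter_spec lucky sequence.toList (sequence.toList.length + 1) 0 [] (by omega)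
      simpa using h
    rw [if_neg hN, houter]
    by_cases hemp : pvF lucky sequence.toList = []
    · rw [if_pos hemp, if_pos hemp]
    · rw [if_neg hemp, if_neg hemp]
      obtain ⟨x, tL, hL⟩ : ∃ x tL, pvF lucky sequence.toList = x :: tL := by
        cases h : pvF lucky sequence.toList with
        | nil => exact absurd h hemp
        | cons a b => exact ⟨a, b, rfl⟩
      have hx2 : pvDist2 x = true := pvF_mem lucky sequence.toList x (by
        rw [hL]; exact List.mem_cons_self)
      have hxne : x ≠ [] := by
        have := pvDist2_len x hx2
        intro hcon
        subst hcon
        simp at this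
      rw [hL]
      congr 1
      rw [PySem.List.pyGetD_zero, List.getD_eq_getElem?_getD, ← List.head?_eq_getElem?,
        pvSorted_head x tL]
      rw [pvPick_cons_big x tL hxne]
      rfl

-- ---- last-element helpers ----
lemma pvLastD_def_irrel (l : List Char) (hl : l ≠ []) (x y : Char) :
    l.getLastD x = l.getLastD y := by
  cases l with
  | nil => exact absurd rfl hl
  | cons a m => rfl
lemma pvLastD_concat (u : List Char) (z : Char) : (u ++ [z]).getLastD ' ' = z := by
  rw [List.getLastD_eq_getLast?, List.getLast?_concat]
  rfl
lemma pvLastD_append (u w : List Char) (hw : w ≠ []) :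
    (u ++ w).getLastD ' ' = w.getLastD ' ' := by
  induction u with
  | nil => rfl
  | cons a u ih =>
    rw [List.cons_append, List.getLastD_cons,
      pvLastD_def_irrel (u ++ w) (by simp [hw]) a ' ', ih]
lemma pvLastD_mem : ∀ (m : List Char) (a d : Char), (a :: m).getLastD d ∈ a :: m := by
  intro m
  induction m with
  | nil => intro a d; simp [List.getLastD]
  | cons b m ih =>
    intro a d
    rw [List.getLastD_cons]
    exact List.mem_cons_of_mem a (ih b a)
lemma pvTakeWhile_all (lucky : List String) (l : List Char) :
    pvAllLucky lucky (l.takeWhile (pvIsLucky lucky)) = true := by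
  rw [pvAllLucky, List.all_eq_true]
  intro x hx
  exact List.mem_takeWhile_imp hx
lemma pvFilter_cons (a : List Char) (L : List (List Char)) :
    List.filter pvDist2 (a :: L) = pvFilt a ++ L.filter pvDist2 := by
  rw [List.filter_cons]
  unfold pvFilt
  by_cases h : pvDist2 a = true
  · rw [if_pos h, if_pos h]
    rfl
  · rw [if_neg h, if_neg h]
    rfl

-- ---- the four-way case analysis relating A's and B's candidate lists ----
theorem pvCases (lucky : List String) (cs : List Char) :
    (pvOk lucky cs = false → pvF lucky cs = pvCands lucky cs) ∧
    (pvOk lucky cs = true →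
      (((PySem.Set.ofList (pvR lucky cs)).length = 1 →
          pvF lucky cs = pvM lucky cs ++ [pvR lucky cs ++ [cs.getLastD ' ']] ∧
          pvCands lucky cs = pvM lucky cs) ∧
       ((PySem.Set.ofList (pvR lucky cs)).length = 2 →
          pvF lucky cs = pvM lucky cs ∧
          pvCands lucky cs = pvM lucky cs ++ [pvR lucky cs]) ∧
       ((PySem.Set.ofList (pvR lucky cs)).length ≠ 1 →
          (PySem.Set.ofList (pvR lucky cs)).length ≠ 2 →
          pvF lucky cs = pvM lucky cs ∧ pvCands lucky cs = pvM lucky cs))) := by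
  match cs with
  | [] =>
    refine ⟨fun _ => ?_, fun hOk => ?_⟩
    · rw [pvF_nil]; rfl
    · simp [pvOk] at hOk
  | [c] =>
    refine ⟨fun _ => ?_, fun hOk => ?_⟩
    · rw [pvF_singleton]
      show ([] : List (List Char)) = (pvRuns lucky [c]).filter pvDist2
      by_cases hc : pvIsLucky lucky c = true
      · rw [pvRuns_all_lucky lucky [c] (by simp [pvAllLucky, hc]) (by simp)]
        have hd : pvDist2 [c] = false := by
          simp [pvDist2, PySem.Set.ofList, PySem.Set.empty, PySem.Set.add]
        simp [hd]
      · rw [pvRuns_cons_nonlucky lucky c [] (by simpa using hc)]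
        rfl
    · simp [pvOk, pvR, pvSufRun] at hOk
  | c :: c2 :: t =>
    by_cases hc : pvIsLucky lucky c = true
    case neg =>
      replace hc : pvIsLucky lucky c = false := by simpa using hc
      have hF : pvF lucky (c :: c2 :: t) = pvF lucky (c2 :: t) := by
        rw [pvF_cons2, if_neg (by simp [hc])]
      have hC : pvCands lucky (c :: c2 :: t) = pvCands lucky (c2 :: t) := by
        unfold pvCands
        rw [pvRuns_cons_nonlucky lucky c (c2 :: t) hc]
      have hdl : (c :: c2 :: t).dropLast = c :: (c2 :: t).dropLast := List.dropLast_cons₂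
      have hrP : pvR lucky (c :: c2 :: t) = pvR lucky (c2 :: t) := by
        unfold pvR
        rw [hdl]
        simp [pvSufRun, hc]
      have hlast : (c :: c2 :: t).getLastD ' ' = (c2 :: t).getLastD ' ' := by
        rw [List.getLastD_cons]
        exact pvLastD_def_irrel (c2 :: t) (by simp) c ' '
      have hok : pvOk lucky (c :: c2 :: t) = pvOk lucky (c2 :: t) := by
        unfold pvOk
        rw [hlast, show pvSufRun lucky (c :: c2 :: t).dropLast =
          pvSufRun lucky (c2 :: t).dropLast from hrP]
        simp
      have hm : pvM lucky (c :: c2 :: t) = pvM lucky (c2 :: t) := by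
        unfold pvM
        rw [hdl]
        have hcore : pvCore lucky (c :: (c2 :: t).dropLast) =
            c :: pvCore lucky ((c2 :: t).dropLast) := by
          simp [pvCore, hc]
        rw [hcore]
        unfold pvCands
        rw [pvRuns_cons_nonlucky lucky c _ hc]
      simp only [hF, hC, hrP, hm, hlast, hok]
      exact pvCases lucky (c2 :: t)
    case pos =>
      set u := (c :: c2 :: t).takeWhile (pvIsLucky lucky) with hu
      have hune : u ≠ [] := by
        rw [hu, List.takeWhile_cons_of_pos hc]
        simp
      have huAll : pvAllLucky lucky u = true := pvTakeWhile_all lucky (c :: c2 :: t)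
      cases hw : (c :: c2 :: t).dropWhile (pvIsLucky lucky) with
      | nil =>
        have hsplit : c :: c2 :: t = u := by
          have h := (List.takeWhile_append_dropWhile
            (p := pvIsLucky lucky) (l := c :: c2 :: t)).symm
          rw [hw, List.append_nil] at h
          exact h
        refine ⟨fun _ => ?_, fun hOk => ?_⟩
        · rw [pvF_cons2, if_pos hc, hw, pvFend_nil]
          unfold pvCands
          rw [show pvRuns lucky (c :: c2 :: t) = [c :: c2 :: t] from
            pvRuns_all_lucky lucky _ (hsplit ▸ huAll) (by simp)]
          rw [pvFilter_cons]
          rw [← hu, hsplit]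
          simp
        · exfalso
          have hlastmem : (c :: c2 :: t).getLastD ' ' ∈ (c :: c2 :: t) :=
            pvLastD_mem (c2 :: t) c ' '
          have hAll : pvAllLucky lucky (c :: c2 :: t) = true := hsplit ▸ huAll
          rw [pvAllLucky, List.all_eq_true] at hAll
          have := hAll _ hlastmem
          unfold pvOk at hOk
          rw [this] at hOk
          simp at hOk
      | cons z v =>
        have hz : pvIsLucky lucky z = false := by
          have h2 : ((c :: c2 :: t).dropWhile (pvIsLucky lucky)) ≠ [] := by
            rw [hw]; simp
          have h := List.head_dropWhile_not (pvIsLucky lucky) h2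
          simp only [hw] at h
          simpa using h
        have hsplit : c :: c2 :: t = u ++ z :: v := by
          have h := (List.takeWhile_append_dropWhile
            (p := pvIsLucky lucky) (l := c :: c2 :: t)).symm
          rw [hw] at h
          exact h
        have hzu : z ∉ u := pvNotMem_of_nonlucky lucky u z hz huAll
        cases v with
        | nil =>
          -- the final run: cs = u ++ [z]
          have hF : pvF lucky (c :: c2 :: t) = pvFilt (u ++ [z]) := by
            rw [pvF_cons2, if_pos hc, hw, pvFend_single]
          have hC : pvCands lucky (c :: c2 :: t) = pvFilt u := by
            unfold pvCands
            rw [hsplit, pvRuns_run_append lucky u z [] huAll hune hz]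
            rw [pvFilter_cons]
            simp [pvRuns, pvRunsPre]
          have hdl : (c :: c2 :: t).dropLast = u := by
            rw [hsplit, List.dropLast_concat]
          have hr : pvR lucky (c :: c2 :: t) = u := by
            unfold pvR
            rw [hdl]
            exact pvSufRun_all lucky u huAll
          have hlast : (c :: c2 :: t).getLastD ' ' = z := by
            rw [hsplit]
            exact pvLastD_concat u z
          have hM : pvM lucky (c :: c2 :: t) = [] := by
            unfold pvM
            rw [hdl, pvCore_all lucky u huAll]
            rfl
          have hok : pvOk lucky (c :: c2 :: t) = true := by
            unfold pvOk
            rw [hlast, hz, show pvSufRun lucky (c :: c2 :: t).dropLast = u from hr]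
            simp [hune]
          have hsnoc : (PySem.Set.ofList (u ++ [z])).length =
              (PySem.Set.ofList u).length + 1 := pvSet_snoc_len u z hzu
          refine ⟨fun h => ?_, fun _ => ⟨fun hd => ?_, fun hd => ?_, fun hd1 hd2 => ?_⟩⟩
          · rw [hok] at h
            exact absurd h (by simp)
          · rw [hr] at hd
            constructor
            · rw [hF, hM, hr, hlast]
              have : pvDist2 (u ++ [z]) = true := by
                simp [pvDist2, hsnoc, hd]
              simp [pvFilt, this]
            · rw [hC, hM]
              have : pvDist2 u = false := by
                simp [pvDist2, hd]
              simp [pvFilt, this]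
          · rw [hr] at hd
            constructor
            · rw [hF, hM]
              have : pvDist2 (u ++ [z]) = false := by
                simp [pvDist2, hsnoc, hd]
              simp [pvFilt, this]
            · rw [hC, hM, hr]
              have : pvDist2 u = true := by
                simp [pvDist2, hd]
              simp [pvFilt, this]
          · rw [hr] at hd1 hd2
            constructor
            · rw [hF, hM]
              have : pvDist2 (u ++ [z]) = false := by
                simp [pvDist2, hsnoc]
                omega
              simp [pvFilt, this]
            · rw [hC, hM]
              have : pvDist2 u = false := by
                simp [pvDist2]
                omega
              simp [pvFilt, this]
        | cons z2 v' =>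
          -- a middle run: cs = u ++ z :: z2 :: v'
          have hF : pvF lucky (c :: c2 :: t) = pvFilt u ++ pvF lucky (z :: z2 :: v') := by
            rw [pvF_cons2, if_pos hc, hw, pvFend_cons2]
          have hC : pvCands lucky (c :: c2 :: t) =
              pvFilt u ++ pvCands lucky (z :: z2 :: v') := by
            unfold pvCands
            rw [hsplit, pvRuns_run_append lucky u z (z2 :: v') huAll hune hz,
              pvFilter_cons, pvRuns_cons_nonlucky lucky z (z2 :: v') hz]
          have hdl : (c :: c2 :: t).dropLast = u ++ z :: (z2 :: v').dropLast := by
            rw [hsplit, List.dropLast_append_of_ne_nil (by simp), List.dropLast_cons₂]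
          have hdlw : (z :: z2 :: v').dropLast = z :: (z2 :: v').dropLast :=
            List.dropLast_cons₂
          have hrP : pvR lucky (c :: c2 :: t) = pvR lucky (z :: z2 :: v') := by
            unfold pvR
            rw [hdl, hdlw, pvSufRun_append_nonlucky lucky z _ hz u]
            simp [pvSufRun, hz]
          have hlast : (c :: c2 :: t).getLastD ' ' = (z :: z2 :: v').getLastD ' ' := by
            rw [hsplit]
            exact pvLastD_append u (z :: z2 :: v') (by simp)
          have hok : pvOk lucky (c :: c2 :: t) = pvOk lucky (z :: z2 :: v') := by
            unfold pvOk
            rw [hlast, show pvSufRun lucky (c :: c2 :: t).dropLast =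
              pvSufRun lucky (z :: z2 :: v').dropLast from hrP]
            simp
          have hm : pvM lucky (c :: c2 :: t) = pvFilt u ++ pvM lucky (z :: z2 :: v') := by
            unfold pvM
            rw [hdl, hdlw, pvCore_append_nonlucky lucky z _ hz u]
            have hcoreW : pvCore lucky (z :: (z2 :: v').dropLast) =
                z :: pvCore lucky ((z2 :: v').dropLast) := by
              simp [pvCore, hz]
            rw [hcoreW]
            unfold pvCands
            rw [pvRuns_run_append lucky u z _ huAll hune hz, pvFilter_cons,
              pvRuns_cons_nonlucky lucky z _ hz]
          obtain ⟨H1, H2⟩ := pvCases lucky (z :: z2 :: v')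
          simp only [hF, hC, hrP, hm, hlast, hok]
          refine ⟨fun h => by rw [H1 h], fun hOk => ?_⟩
          obtain ⟨G1, G2, G3⟩ := H2 hOk
          refine ⟨fun hd => ?_, fun hd => ?_, fun hd1 hd2 => ?_⟩
          · obtain ⟨e1, e2⟩ := G1 hd
            exact ⟨by rw [e1, List.append_assoc], by rw [e2]⟩
          · obtain ⟨e1, e2⟩ := G2 hd
            exact ⟨by rw [e1], by rw [e2, List.append_assoc]⟩
          · obtain ⟨e1, e2⟩ := G3 hd1 hd2
            exact ⟨by rw [e1], by rw [e2]⟩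
termination_by cs.length
decreasing_by
  all_goals first
    | (simp; done)
    | (have hlen := List.length_dropWhile_le (p := pvIsLucky lucky) (l := c2 :: t); rw [List.dropWhile_cons_of_pos hc] at hw; rw [hw] at hlen; simp at hlen ⊢; omega)

-- ---- final assembly ----
lemma pvPick_ne_nil (L : List (List Char)) (hmem : ∀ x ∈ L, pvDist2 x = true)
    (hne : L ≠ []) : pvPick L ≠ [] := by
  match L, hne with
  | x :: t, _ =>
    have h2 : 2 ≤ x.length := pvDist2_len x (hmem x List.mem_cons_self)
    have hlen : (pvPick (x :: t)).length = pvMaxLen (x :: t) := pvPick_len (x :: t)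
    have hge : x.length ≤ pvMaxLen (x :: t) := pvMaxLen_ge _ x List.mem_cons_self
    intro hcon
    rw [hcon] at hlen
    simp at hlen
    omega

lemma pvOk_iff (lucky : List String) (cs : List Char) :
    pvOk lucky cs = true ↔
      (cs ≠ [] ∧ pvIsLucky lucky (cs.getLastD ' ') = false ∧
        pvSufRun lucky cs.dropLast ≠ []) := by
  unfold pvOk
  simp [Bool.and_eq_true, List.isEmpty_iff, Bool.not_eq_true']
  tauto

lemma pvConstChain (p : Char → Bool) (v : Bool) : ∀ l : List Char, (∀ x ∈ l, p x = v) →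
    l.IsChain (fun a b => (p a == p b : Bool)) := by
  intro l
  induction l with
  | nil => intro _; exact List.IsChain.nil
  | cons c t ih =>
    intro h
    cases t with
    | nil => exact List.isChain_singleton _
    | cons d u =>
      rw [List.isChain_cons_cons]
      refine ⟨?_, ih (fun x hx => h x (List.mem_cons_of_mem _ hx))⟩
      simp [h c List.mem_cons_self, h d (List.mem_cons_of_mem _ List.mem_cons_self)]

lemma pvDedupLen (l : List Char) : l.dedup.length = (PySem.Set.ofList l).length := by
  have hp : l.dedup.Perm (PySem.Set.ofList l) := by
    apply List.perm_of_nodup_nodup_toFinset_eq (List.nodup_dedup l) (PySem.Set.nodup_ofList l)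
    ext x
    simp [List.mem_toFinset, List.mem_dedup, PySem.Set.mem_ofList]
  exact hp.length_eq

lemma pvRuns_nonlucky_prefix (lucky : List String) : ∀ (nu m : List Char),
    (∀ x ∈ nu, pvIsLucky lucky x = false) → pvRuns lucky (nu ++ m) = pvRuns lucky m := by
  intro nu
  induction nu with
  | nil => intro m _; rfl
  | cons c t ih =>
    intro m h
    rw [List.cons_append, pvRuns_cons_nonlucky lucky c _ (h c List.mem_cons_self),
      ih m (fun x hx => h x (List.mem_cons_of_mem _ hx))]

-- the splitBy blocks that are all-lucky ARE the maximal lucky runs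
theorem pvSB (lucky : List String) (t : List Char) :
    ((t.splitBy (fun a b => pvIsLucky lucky a == pvIsLucky lucky b)).filter
      (·.all (pvIsLucky lucky))) = pvRuns lucky t := by
  match t with
  | [] => rw [List.splitBy_nil]; rfl
  | c :: t' =>
    have hqc : (fun x => pvIsLucky lucky x == pvIsLucky lucky c) c = true := by simp
    set q : Char → Bool := fun x => pvIsLucky lucky x == pvIsLucky lucky c with hq
    set u := (c :: t').takeWhile q with hu
    set w := (c :: t').dropWhile q with hw
    have hsplit : c :: t' = u ++ w := (List.takeWhile_append_dropWhile).symm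
    have hune : u ≠ [] := by
      rw [hu, List.takeWhile_cons_of_pos hqc]
      simp
    have huv : ∀ x ∈ u, pvIsLucky lucky x = pvIsLucky lucky c := by
      intro x hx
      have := List.mem_takeWhile_imp (l := c :: t') (p := q) (hu ▸ hx)
      simpa [hq] using this
    have hchain : u.IsChain (fun a b => (pvIsLucky lucky a == pvIsLucky lucky b : Bool)) := by
      have := pvConstChain (pvIsLucky lucky) (pvIsLucky lucky c) u huv
      simpa using this
    cases hwc : w with
    | nil =>
      have hcu : c :: t' = u := by rw [hsplit, hwc, List.append_nil]
      rw [hcu, List.splitBy_of_isChain hune hchain]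
      cases hv : pvIsLucky lucky c with
      | true =>
        have hall : u.all (pvIsLucky lucky) = true := by
          rw [List.all_eq_true]
          intro x hx
          rw [huv x hx, hv]
        rw [show List.filter (·.all (pvIsLucky lucky)) [u] = [u] by simp [hall]]
        exact (pvRuns_all_lucky lucky u (by simpa [pvAllLucky] using hall) hune).symm
      | false =>
        have hall : u.all (pvIsLucky lucky) = false := by
          match u, hune with
          | a :: b, _ =>
            simp [List.all_cons, huv a List.mem_cons_self, hv]
        rw [show List.filter (·.all (pvIsLucky lucky)) [u] = [] by simp [List.filter, hall]]
        have := pvRuns_nonlucky_prefix lucky u [] (fun x hx => by rw [huv x hx, hv])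
        rw [List.append_nil] at this
        rw [this]
        rfl
    | cons z v' =>
      have hdw : (c :: t').dropWhile q = z :: v' := by rw [← hw]; exact hwc
      have hz : q z = false := by
        have h2 : ((c :: t').dropWhile q) ≠ [] := by rw [hdw]; simp
        have h := List.head_dropWhile_not q h2
        simp only [hdw] at h
        simpa using h
      have hzne : pvIsLucky lucky z ≠ pvIsLucky lucky c := by simpa [hq] using hz
      have hbound : ∀ x ∈ u.getLast?,
          (fun a b => (pvIsLucky lucky a == pvIsLucky lucky b : Bool)) x z = false := by
        intro x hx
        have hxu : x ∈ u := List.mem_of_mem_getLast? hx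
        have := huv x hxu
        simp only [this]
        simp only [beq_eq_false_iff_ne, ne_eq]
        exact fun hcon => hzne hcon.symm
      rw [hsplit, hwc, List.splitBy_append_cons v' hbound, List.filter_append,
        List.splitBy_of_isChain hune hchain]
      have hrec := pvSB lucky (z :: v')
      cases hv : pvIsLucky lucky c with
      | true =>
        have hzf : pvIsLucky lucky z = false := by
          cases hzv : pvIsLucky lucky z with
          | true => exact absurd (hzv.trans hv.symm) hzne
          | false => rfl
        have hall : u.all (pvIsLucky lucky) = true := by
          rw [List.all_eq_true]
          intro x hx
          rw [huv x hx, hv]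
        rw [show List.filter (·.all (pvIsLucky lucky)) [u] = [u] by simp [hall]]
        rw [hrec, pvRuns_cons_nonlucky lucky z v' hzf,
          pvRuns_run_append lucky u z v' (by simpa [pvAllLucky] using hall) hune hzf]
        rfl
      | false =>
        have hall : u.all (pvIsLucky lucky) = false := by
          match u, hune with
          | a :: b, _ =>
            simp [List.all_cons, huv a List.mem_cons_self, hv]
        rw [show List.filter (·.all (pvIsLucky lucky)) [u] = [] by simp [List.filter, hall]]
        rw [hrec, pvRuns_nonlucky_prefix lucky u (z :: v') (fun x hx => by rw [huv x hx, hv])]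
        rfl
termination_by t.length
decreasing_by
  have hlen := List.length_dropWhile_le (p := q) (l := t')
  have hstep : List.dropWhile q (c :: t') = List.dropWhile q t' :=
    List.dropWhile_cons_of_pos (by exact hqc)
  rw [hstep] at hdw
  rw [hdw] at hlen
  simp only [List.length_cons] at hlen ⊢
  omega

lemma pvSufRun_ne_iff (lucky : List String) : ∀ t : List Char,
    pvSufRun lucky t ≠ [] ↔ (t ≠ [] ∧ pvIsLucky lucky (t.getLastD ' ') = true) := by
  intro t
  induction t with
  | nil => simp [pvSufRun]
  | cons c t' ih =>
    by_cases hcond : (pvIsLucky lucky c && pvAllLucky lucky t') = true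
    · rw [show pvSufRun lucky (c :: t') = c :: t' from by rw [pvSufRun, if_pos hcond]]
      have hmem := pvLastD_mem t' c ' '
      have hall : pvAllLucky lucky (c :: t') = true := by
        rw [Bool.and_eq_true] at hcond
        simp only [pvAllLucky, List.all_cons, Bool.and_eq_true]
        exact ⟨hcond.1, by simpa [pvAllLucky] using hcond.2⟩
      rw [pvAllLucky, List.all_eq_true] at hall
      simp only [ne_eq, reduceCtorEq, not_false_eq_true, true_and, List.cons_ne_self]
      constructor
      · intro _; exact hall _ hmem
      · intro _; simp
    · rw [show pvSufRun lucky (c :: t') = pvSufRun lucky t' from by rw [pvSufRun, if_neg hcond]]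
      rw [ih]
      constructor
      · rintro ⟨h1, h2⟩
        refine ⟨by simp, ?_⟩
        rw [List.getLastD_cons, pvLastD_def_irrel t' h1 c ' ']
        exact h2
      · rintro ⟨-, h2⟩
        cases ht' : t' with
        | nil =>
          exfalso
          rw [ht'] at h2 hcond
          simp only [List.getLastD_cons, List.getLastD_nil] at h2
          simp [pvAllLucky, h2] at hcond
        | cons a b =>
          refine ⟨by simp, ?_⟩
          rw [← ht']
          rw [List.getLastD_cons, pvLastD_def_irrel t' (by rw [ht']; simp) c ' '] at h2
          exact h2

theorem pvRunsSplit (lucky : List String) (t : List Char) (h : pvSufRun lucky t ≠ []) :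
    pvRuns lucky t = pvRuns lucky (pvCore lucky t) ++ [pvSufRun lucky t] := by
  match t with
  | [] => exact absurd rfl h
  | c :: t' =>
    by_cases hcond : (pvIsLucky lucky c && pvAllLucky lucky t') = true
    · have hs : pvSufRun lucky (c :: t') = c :: t' := by rw [pvSufRun, if_pos hcond]
      have hc0 : pvCore lucky (c :: t') = [] := by rw [pvCore, if_pos hcond]
      rw [hs, hc0]
      rw [Bool.and_eq_true] at hcond
      rw [pvRuns_all_lucky lucky (c :: t') (by
        simp only [pvAllLucky, List.all_cons, Bool.and_eq_true]
        exact ⟨hcond.1, by simpa [pvAllLucky] using hcond.2⟩) (by simp)]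
      rfl
    · by_cases hcl : pvIsLucky lucky c = true
      · -- the head run reaches into t' but not to its end
        set u := (c :: t').takeWhile (pvIsLucky lucky) with hu
        have hune : u ≠ [] := by
          rw [hu, List.takeWhile_cons_of_pos hcl]
          simp
        have huAll : pvAllLucky lucky u = true := pvTakeWhile_all lucky (c :: t')
        cases hw : (c :: t').dropWhile (pvIsLucky lucky) with
        | nil =>
          exfalso
          have hsplit : c :: t' = u := by
            have hx := (List.takeWhile_append_dropWhile
              (p := pvIsLucky lucky) (l := c :: t')).symm
            rw [hw, List.append_nil] at hx
            exact hx
          have hall : pvAllLucky lucky (c :: t') = true := hsplit ▸ huAll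
          simp only [pvAllLucky, List.all_cons, Bool.and_eq_true] at hall
          exact hcond (by
            rw [Bool.and_eq_true]
            exact ⟨hall.1, by simpa [pvAllLucky] using hall.2⟩)
        | cons z v =>
          have hsplit : c :: t' = u ++ z :: v := by
            have hx := (List.takeWhile_append_dropWhile
              (p := pvIsLucky lucky) (l := c :: t')).symm
            rw [hw] at hx
            exact hx
          have hz : pvIsLucky lucky z = false := by
            have h2 : ((c :: t').dropWhile (pvIsLucky lucky)) ≠ [] := by rw [hw]; simp
            have hh := List.head_dropWhile_not (pvIsLucky lucky) h2
            simp only [hw] at hh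
            simpa using hh
          have hsv : pvSufRun lucky (u ++ z :: v) = pvSufRun lucky v :=
            pvSufRun_append_nonlucky lucky z v hz u
          have hcv : pvCore lucky (u ++ z :: v) = u ++ z :: pvCore lucky v :=
            pvCore_append_nonlucky lucky z v hz u
          have hrec := pvRunsSplit lucky v (by
            rw [hsplit, hsv] at h
            exact h)
          rw [hsplit, pvRuns_run_append lucky u z v huAll hune hz, hrec, hsv, hcv,
            pvRuns_run_append lucky u z (pvCore lucky v) huAll hune hz]
          rfl
      · have hs : pvSufRun lucky (c :: t') = pvSufRun lucky t' := by
          rw [pvSufRun, if_neg hcond]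
        have hcr : pvCore lucky (c :: t') = c :: pvCore lucky t' := by
          rw [pvCore, if_neg hcond]
        have hcf : pvIsLucky lucky c = false := by simpa using hcl
        rw [hs, hcr, pvRuns_cons_nonlucky lucky c t' hcf,
          pvRuns_cons_nonlucky lucky c _ hcf]
        exact pvRunsSplit lucky t' (by rw [← hs]; exact h)
termination_by t.length
decreasing_by
  all_goals first
    | (simp; done)
    | (have hlen := List.length_dropWhile_le (p := pvIsLucky lucky) (l := c :: t');
       rw [hw] at hlen; simp at hlen ⊢; omega)

lemma pvMaxLen_lt (L : List (List Char)) (K : Nat) (hK : 0 < K)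
    (h : ∀ b ∈ L, b.length < K) : pvMaxLen L < K := by
  have haux : ∀ (M : List (List Char)) (acc : Nat), acc < K → (∀ b ∈ M, b.length < K) →
      M.foldl (fun m r => max m r.length) acc < K := by
    intro M
    induction M with
    | nil => intro acc h1 _; simpa using h1
    | cons x xs ih =>
      intro acc h1 h2
      simp only [List.foldl_cons]
      exact ih _ (by have := h2 x List.mem_cons_self; omega)
        (fun b hb => h2 b (List.mem_cons_of_mem _ hb))
  exact haux L 0 hK h

lemma pvD_iff (sequence : String) (lucky : List String) :
    D_luckySeq2 sequence lucky ↔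
      (pvOk lucky sequence.toList = true ∧
        (((PySem.Set.ofList (pvR lucky sequence.toList)).length = 1 ∧
            pvMaxLen (pvM lucky sequence.toList) < (pvR lucky sequence.toList).length + 1) ∨
         ((PySem.Set.ofList (pvR lucky sequence.toList)).length = 2 ∧
            pvMaxLen (pvM lucky sequence.toList) < (pvR lucky sequence.toList).length))) := by
  have hMmem : ∀ b ∈ pvM lucky sequence.toList,
      b.dedup.length = 2 ∧ b ∈ pvRuns lucky (pvCore lucky sequence.toList.dropLast) := by
    intro b hb
    have h1 : pvDist2 b = true := pvCands_mem lucky _ b hb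
    have h2 : b ∈ pvRuns lucky (pvCore lucky sequence.toList.dropLast) :=
      List.mem_of_mem_filter hb
    simp only [pvDist2, beq_iff_eq] at h1
    exact ⟨by rw [pvDedupLen]; exact h1, h2⟩
  constructor
  · intro hD
    unfold D_luckySeq2 at hD
    simp only [pvSB] at hD
    obtain ⟨h1, h2, h3, h4, h5⟩ := hD
    have htne : sequence.toList.dropLast ≠ [] := by
      intro hcon
      rw [hcon] at h3
      exact h3 rfl
    have hsuf : pvSufRun lucky sequence.toList.dropLast ≠ [] :=
      (pvSufRun_ne_iff lucky _).mpr ⟨htne, h2⟩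
    have hspl := pvRunsSplit lucky sequence.toList.dropLast hsuf
    have hr : (pvRuns lucky sequence.toList.dropLast).getLastD [] =
        pvSufRun lucky sequence.toList.dropLast := by
      rw [hspl, List.getLastD_eq_getLast?, List.getLast?_concat]
      rfl
    have hdropL : (pvRuns lucky sequence.toList.dropLast).dropLast =
        pvRuns lucky (pvCore lucky sequence.toList.dropLast) := by
      rw [hspl, List.dropLast_concat]
    rw [hr] at h3 h4 h5
    rw [hdropL] at h5
    have hcsne : sequence.toList ≠ [] := by
      intro hcon
      exact htne (by rw [hcon]; rfl)
    have hd := pvDedupLen (pvSufRun lucky sequence.toList.dropLast)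
    have hd1 : 1 ≤ (pvSufRun lucky sequence.toList.dropLast).dedup.length := by
      match hsr : pvSufRun lucky sequence.toList.dropLast, hsuf with
      | a :: b, _ =>
        have : a ∈ (a :: b).dedup := by rw [List.mem_dedup]; exact List.mem_cons_self
        have := List.length_pos_iff.mpr (List.ne_nil_of_mem this)
        omega
    have hrlen : 1 ≤ (pvSufRun lucky sequence.toList.dropLast).length :=
      List.length_pos_iff.mpr hsuf
    have hmax : pvMaxLen (pvM lucky sequence.toList) +
        (pvSufRun lucky sequence.toList.dropLast).dedup.length <
        (pvSufRun lucky sequence.toList.dropLast).length + 2 := by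
      have hK : pvMaxLen (pvM lucky sequence.toList) <
          (pvSufRun lucky sequence.toList.dropLast).length + 2 -
          (pvSufRun lucky sequence.toList.dropLast).dedup.length := by
        apply pvMaxLen_lt
        · omega
        · intro b hb
          obtain ⟨hb2, hbm⟩ := hMmem b hb
          have := h5 b hbm hb2
          omega
      omega
    have hpr : pvR lucky sequence.toList = pvSufRun lucky sequence.toList.dropLast := rfl
    refine ⟨?_, ?_⟩
    · unfold pvOk
      rw [List.getLastD_eq_getLast?] at h1
      simp [List.isEmpty_iff, hcsne, h1, hsuf, List.getLastD_eq_getLast?]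
    · rw [hpr]
      rcases (show (pvSufRun lucky sequence.toList.dropLast).dedup.length = 1 ∨
          (pvSufRun lucky sequence.toList.dropLast).dedup.length = 2 by omega) with he | he
      · exact Or.inl ⟨by rw [← hd, he], by omega⟩
      · exact Or.inr ⟨by rw [← hd, he], by omega⟩
  · rintro ⟨hOk, hdisj⟩
    have hOk' := (pvOk_iff lucky sequence.toList).mp hOk
    obtain ⟨hcsne, hlastf, hsuf⟩ := hOk'
    have htl := (pvSufRun_ne_iff lucky sequence.toList.dropLast).mp hsuf
    have hspl := pvRunsSplit lucky sequence.toList.dropLast hsuf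
    have hr : (pvRuns lucky sequence.toList.dropLast).getLastD [] =
        pvSufRun lucky sequence.toList.dropLast := by
      rw [hspl, List.getLastD_eq_getLast?, List.getLast?_concat]
      rfl
    have hdropL : (pvRuns lucky sequence.toList.dropLast).dropLast =
        pvRuns lucky (pvCore lucky sequence.toList.dropLast) := by
      rw [hspl, List.dropLast_concat]
    have hd := pvDedupLen (pvSufRun lucky sequence.toList.dropLast)
    rw [show pvR lucky sequence.toList = pvSufRun lucky sequence.toList.dropLast
      from rfl] at hdisj
    unfold D_luckySeq2
    simp only [pvSB]
    rw [hr, hdropL]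
    refine ⟨hlastf, htl.2, hsuf, ?_, ?_⟩
    · rcases hdisj with ⟨he, -⟩ | ⟨he, -⟩ <;> omega
    · intro b hbm hb2
      have hble : b.length ≤ pvMaxLen (pvM lucky sequence.toList) := by
        apply pvMaxLen_ge
        show b ∈ List.filter pvDist2 (pvRuns lucky (pvCore lucky sequence.toList.dropLast))
        rw [List.mem_filter]
        refine ⟨hbm, ?_⟩
        simp only [pvDist2, beq_iff_eq]
        rw [← pvDedupLen]
        exact hb2
      rcases hdisj with ⟨he, hlt⟩ | ⟨he, hlt⟩ <;> omega

-- ===== VERDICT (by name: the statement is the Claim_ definition above) =====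
theorem luckySeq2_spec : Claim_unchanged_luckySeq2 := by
  unfold Claim_unchanged_luckySeq2
  intro sequence lucky _
  unfold Spec_luckySeq2
  intro hD
  rw [pvA_char, pvAlt_char]
  rw [pvD_iff] at hD
  obtain ⟨HA, HB⟩ := pvCases lucky sequence.toList
  by_cases hOk : pvOk lucky sequence.toList = true
  case neg =>
    rw [HA (by simpa using hOk)]
    by_cases hemp : pvCands lucky sequence.toList = []
    · rw [if_pos hemp, if_pos (by rw [hemp]; rfl)]
    · rw [if_neg hemp,
        if_neg (pvPick_ne_nil _ (pvCands_mem lucky sequence.toList) hemp)]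
  case pos =>
    obtain ⟨G1, G2, G3⟩ := HB hOk
    have hnd : ¬ ((((PySem.Set.ofList (pvR lucky sequence.toList)).length = 1 ∧
        pvMaxLen (pvM lucky sequence.toList) < (pvR lucky sequence.toList).length + 1) ∨
       ((PySem.Set.ofList (pvR lucky sequence.toList)).length = 2 ∧
        pvMaxLen (pvM lucky sequence.toList) < (pvR lucky sequence.toList).length))) :=
      fun h => hD ⟨hOk, h⟩
    by_cases hd1 : (PySem.Set.ofList (pvR lucky sequence.toList)).length = 1
    · obtain ⟨e1, e2⟩ := G1 hd1
      have hrne : pvR lucky sequence.toList ≠ [] := ((pvOk_iff lucky _).mp hOk).2.2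
      have hrlen : 1 ≤ (pvR lucky sequence.toList).length := List.length_pos_iff.mpr hrne
      have hLge : (pvR lucky sequence.toList).length + 1 ≤ pvMaxLen (pvM lucky sequence.toList) := by
        by_contra hcon
        exact hnd (Or.inl ⟨hd1, by omega⟩)
      have hMne : pvM lucky sequence.toList ≠ [] := by
        intro hcon
        rw [hcon] at hLge
        have h0 : pvMaxLen ([] : List (List Char)) = 0 := rfl
        omega
      rw [e1, e2]
      have hpick : pvPick (pvM lucky sequence.toList ++
          [pvR lucky sequence.toList ++ [sequence.toList.getLastD ' ']]) =
          pvPick (pvM lucky sequence.toList) := by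
        rw [pvPick_append_singleton, if_neg]
        rw [pvPick_len]
        simp
        omega
      rw [hpick]
      rw [if_neg (by simp), if_neg (by
        apply pvPick_ne_nil
        · rw [← e2]; exact pvCands_mem lucky sequence.toList
        · exact hMne)]
    · by_cases hd2 : (PySem.Set.ofList (pvR lucky sequence.toList)).length = 2
      · obtain ⟨e1, e2⟩ := G2 hd2
        have hrlen : 2 ≤ (pvR lucky sequence.toList).length := by
          have := pvSetLen_le (pvR lucky sequence.toList)
          omega
        have hLge : (pvR lucky sequence.toList).length ≤ pvMaxLen (pvM lucky sequence.toList) := by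
          by_contra hcon
          exact hnd (Or.inr ⟨hd2, by omega⟩)
        have hMne : pvM lucky sequence.toList ≠ [] := by
          intro hcon
          rw [hcon] at hLge
          have h0 : pvMaxLen ([] : List (List Char)) = 0 := rfl
          omega
        rw [e1, e2]
        have hpick : pvPick (pvM lucky sequence.toList ++ [pvR lucky sequence.toList]) =
            pvPick (pvM lucky sequence.toList) := by
          rw [pvPick_append_singleton, if_neg]
          rw [pvPick_len]
          omega
        rw [hpick]
        rw [if_neg hMne, if_neg (by
          apply pvPick_ne_nil
          · rw [← e1]; exact pvF_mem lucky sequence.toList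
          · exact hMne)]
      · obtain ⟨e1, e2⟩ := G3 hd1 hd2
        rw [e1, e2]
        by_cases hemp : pvM lucky sequence.toList = []
        · rw [if_pos hemp, if_pos (by rw [hemp]; rfl)]
        · rw [if_neg hemp, if_neg (by
            apply pvPick_ne_nil
            · rw [← e2]; exact pvCands_mem lucky sequence.toList
            · exact hemp)]

theorem luckySeq2_changed : Claim_changed_luckySeq2 := by
  unfold Claim_changed_luckySeq2; decide

theorem luckySeq2_tight : Claim_exact_luckySeq2 := by
  unfold Claim_exact_luckySeq2
  intro sequence lucky _ hD
  rw [pvA_char, pvAlt_char]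
  rw [pvD_iff] at hD
  obtain ⟨hOk, hD2⟩ := hD
  obtain ⟨HA, HB⟩ := pvCases lucky sequence.toList
  obtain ⟨G1, G2, G3⟩ := HB hOk
  have hrne : pvR lucky sequence.toList ≠ [] := ((pvOk_iff lucky _).mp hOk).2.2
  have hpmlen : (pvPick (pvM lucky sequence.toList)).length =
      pvMaxLen (pvM lucky sequence.toList) := pvPick_len _
  rcases hD2 with ⟨hd, hL⟩ | ⟨hd, hL⟩
  · obtain ⟨e1, e2⟩ := G1 hd
    have hrlen : 1 ≤ (pvR lucky sequence.toList).length := List.length_pos_iff.mpr hrne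
    rw [e1, e2]
    have hpick : pvPick (pvM lucky sequence.toList ++
        [pvR lucky sequence.toList ++ [sequence.toList.getLastD ' ']]) =
        pvR lucky sequence.toList ++ [sequence.toList.getLastD ' '] := by
      rw [pvPick_append_singleton, if_pos]
      rw [pvPick_len]
      simp
      omega
    rw [if_neg (by simp), hpick]
    by_cases hemp : pvM lucky sequence.toList = []
    · rw [hemp, if_pos (show pvPick ([] : List (List Char)) = [] from rfl)]
      intro heq
      have h1 := congrArg (fun s => List.length s.toList) heq
      simp only [String.toList_ofList] at h1
      simp at h1
      exact hrne h1
    · rw [if_neg (pvPick_ne_nil _ (by rw [← e2]; exact pvCands_mem lucky sequence.toList) hemp)]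
      intro heq
      have h1 := congrArg (fun s => List.length s.toList) heq
      simp only [String.toList_ofList] at h1
      simp only [List.length_append, List.length_cons, List.length_nil] at h1
      rw [hpmlen] at h1
      omega
  · obtain ⟨e1, e2⟩ := G2 hd
    have hrlen : 2 ≤ (pvR lucky sequence.toList).length := by
      have := pvSetLen_le (pvR lucky sequence.toList)
      omega
    rw [e1, e2]
    have hpick : pvPick (pvM lucky sequence.toList ++ [pvR lucky sequence.toList]) =
        pvR lucky sequence.toList := by
      rw [pvPick_append_singleton, if_pos]
      rw [pvPick_len]
      omega
    rw [hpick, if_neg hrne]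
    by_cases hemp : pvM lucky sequence.toList = []
    · rw [if_pos hemp]
      intro heq
      have h1 := congrArg (fun s => List.length s.toList) heq
      simp only [String.toList_ofList] at h1
      simp at h1
      omega
    · rw [if_neg hemp]
      intro heq
      have h1 := congrArg (fun s => List.length s.toList) heq
      simp only [String.toList_ofList] at h1
      rw [hpmlen] at h1
      omega
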